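-- pv_equiv track=rewrite | github.com/garretdgrant/osbp_detect | src/signal_utils.py | merge_consecutive_bool
-- ===== SOURCE A (Python) =====
-- from itertools import groupby
-- from typing import Dict, List, Optional, Sequence, Tuple
--
-- def merge_consecutive_bool(
--     mask: Sequence[bool],
-- ) -> List[Tuple[bool, Tuple[int, int]]]:
--     """
--     Compress boolean runs into contiguous spans.
--
--     Example:
--         [True, True, False, False, False, True] => [(True, (0, 2)), (False, (2, 5)), (True, (5, 6))]
--     """
--     run_sum = 0
--     out_lst: List[Tuple[bool, Tuple[int, int]]] = []
--     count_bool = [(key, sum(1 for _ in group)) for key, group in groupby(mask)]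
--     for value, count in count_bool:
--         start = run_sum
--         run_sum += count
--         out_lst.append((value, (start, run_sum)))
--
--     if not out_lst:
--         return []
--
--     if not out_lst[0][0]:
--         out_lst = out_lst[1:]
--     if out_lst and not out_lst[-1][0]:
--         out_lst = out_lst[:-1]
--     return out_lst
-- ===== SOURCE B (Python) =====
-- def merge_consecutive_bool(mask):
--     """Extract True runs directly: filter run-start and run-end indices from the
--     index range, pair them up, and synthesize the False gaps between consecutive
--     True runs. Leading/trailing False never enters, so no trimming step exists."""
--     n = len(mask)
--     starts = [i for i in range(n) if mask[i] and (i == 0 or not mask[i - 1])]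
--     ends = [i + 1 for i in range(n) if mask[i] and (i == n - 1 or not mask[i + 1])]
--     out = []
--     prev_end = None
--     for s, e in zip(starts, ends):
--         if prev_end is not None:
--             out.append((False, (prev_end, s)))
--         out.append((True, (s, e)))
--         prev_end = e
--     return out
-- ===== Notes on version B (the rewrite author's own statement) =====
-- stated objective: alternative
-- what changed: Instead of run-length-encoding all runs with groupby and then trimming leading/trailing False spans, B filters the indices where True runs start and end, zips them into True spans and synthesizes the False gaps between consecutive True spans; False runs at the edges never appear, so no trimming step exists.
import Mathlib
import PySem

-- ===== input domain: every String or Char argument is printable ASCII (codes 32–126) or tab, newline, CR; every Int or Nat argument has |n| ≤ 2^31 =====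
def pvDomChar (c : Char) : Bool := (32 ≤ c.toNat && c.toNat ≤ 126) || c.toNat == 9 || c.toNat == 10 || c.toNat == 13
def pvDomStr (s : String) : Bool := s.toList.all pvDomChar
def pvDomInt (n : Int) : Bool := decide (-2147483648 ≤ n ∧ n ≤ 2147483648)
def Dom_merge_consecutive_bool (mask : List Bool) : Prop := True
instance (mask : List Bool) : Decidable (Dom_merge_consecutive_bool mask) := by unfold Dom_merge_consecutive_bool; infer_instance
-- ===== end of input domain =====

-- B replaces A's groupby run-length encoding + trimming by a different algorithm:
-- filter the indices where True runs start/end, zip them into True spans and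
-- synthesize the False gaps between consecutive True spans (objective: alternative).

-- ===== PORT A =====
-- groupby(mask) with per-group counts: [(key, sum(1 for _ in group)) for key, group in groupby(mask)]
def pvGroupbyAux (k : Bool) (c : Int) : List Bool → List (Bool × Int)
  | [] => [(k, c)]
  | x :: xs => if x == k then pvGroupbyAux k (c + 1) xs else (k, c) :: pvGroupbyAux x 1 xs

def pvGroupby : List Bool → List (Bool × Int)
  | [] => []
  | x :: xs => pvGroupbyAux x 1 xs

-- the 'for value, count in count_bool' loop accumulating run_sum
def pvSpans (run_sum : Int) : List (Bool × Int) → List (Bool × (Int × Int))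
  | [] => []
  | (v, c) :: t => (v, (run_sum, run_sum + c)) :: pvSpans (run_sum + c) t

def merge_consecutive_bool (mask : List Bool) : List (Bool × (Int × Int)) :=
  let out_lst := pvSpans 0 (pvGroupby mask)
  match out_lst with
  | [] => []
  | (v, p) :: rest =>
    -- if not out_lst[0][0]: out_lst = out_lst[1:]
    let out_lst := if v then (v, p) :: rest else rest
    -- if out_lst and not out_lst[-1][0]: out_lst = out_lst[:-1]
    match out_lst.getLast? with
    | none => []
    | some (w, _) => if w then out_lst else out_lst.dropLast

-- ===== PORT B =====
-- starts = [i for i in range(n) if mask[i] and (i == 0 or not mask[i-1])]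
-- (every index actually read is in range thanks to the short-circuit, so getD is exact)
def pvStarts (mask : List Bool) : List Int :=
  ((List.range mask.length).filter
    (fun i => mask.getD i false && (decide (i = 0) || !(mask.getD (i - 1) false)))).map
    (fun i : Nat => (i : Int))

-- ends = [i + 1 for i in range(n) if mask[i] and (i == n - 1 or not mask[i+1])]
def pvEnds (mask : List Bool) : List Int :=
  ((List.range mask.length).filter
    (fun i => mask.getD i false && (decide (i = mask.length - 1) || !(mask.getD (i + 1) false)))).map
    (fun i : Nat => (i : Int) + 1)

-- the 'for s, e in zip(starts, ends)' loop with the prev_end accumulator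
def pvBuild (prev_end : Option Int) : List (Int × Int) → List (Bool × (Int × Int))
  | [] => []
  | (s, e) :: t =>
    (match prev_end with | some p => [(false, (p, s))] | none => []) ++
      (true, (s, e)) :: pvBuild (some e) t

def merge_consecutive_bool_alt (mask : List Bool) : List (Bool × (Int × Int)) :=
  pvBuild none ((pvStarts mask).zip (pvEnds mask))

-- ===== PRECONDITION & SPEC =====
def Spec_merge_consecutive_bool (mask : List Bool) (out : List (Bool × (Int × Int))) : Prop := out = merge_consecutive_bool_alt mask
instance (mask : List Bool) (out : List (Bool × (Int × Int))) : Decidable (Spec_merge_consecutive_bool mask out) := by unfold Spec_merge_consecutive_bool; infer_instance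

-- ===== CLAIM (what is proved, stated in full; the proofs are below) =====
def Claim_equal_merge_consecutive_bool : Prop := ∀ (mask : List Bool), Dom_merge_consecutive_bool mask → Spec_merge_consecutive_bool mask (merge_consecutive_bool mask)

-- ===== LEMMAS AND PROOFS =====

-- reference: the untrimmed run list as one direct pass (bridge for A's side)
def pvRuns (v : Bool) (s i : Int) : List Bool → List (Bool × (Int × Int))
  | [] => [(v, (s, i))]
  | x :: xs => if x != v then (v, (s, i)) :: pvRuns x i (i + 1) xs else pvRuns v s (i + 1) xs

-- reference: the list of maximal True runs (s, e) with absolute Int offsets;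
-- st = start of the pending True run, if inside one
def pvTP : Option Int → List Bool → Int → List (Int × Int)
  | some s, [], i => [(s, i)]
  | none, [], _ => []
  | none, false :: xs, i => pvTP none xs (i + 1)
  | none, true :: xs, i => pvTP (some i) xs (i + 1)
  | some s, true :: xs, i => pvTP (some s) xs (i + 1)
  | some s, false :: xs, i => (s, i) :: pvTP none xs (i + 1)

-- index-filter form of pvStarts with an explicit previous-element value p
def pvF (p : Bool) (ys : List Bool) : List Nat :=
  (List.range ys.length).filter
    (fun i => ys.getD i false && (if i = 0 then !p else !(ys.getD (i - 1) false)))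

-- index-filter form of pvEnds (before the cast and the +1)
def pvG (ys : List Bool) : List Nat :=
  (List.range ys.length).filter
    (fun i => ys.getD i false && (decide (i = ys.length - 1) || !(ys.getD (i + 1) false)))

-- recursive Int-valued forms of the start / end index lists
def pvFr (p : Bool) : List Bool → Int → List Int
  | [], _ => []
  | x :: xs, i => (if x && !p then [i] else []) ++ pvFr x xs (i + 1)

def pvGr : List Bool → Int → List Int
  | [], _ => []
  | x :: xs, i => (if x && !(xs.headD false) then [i + 1] else []) ++ pvGr xs (i + 1)

def pvTrimFirst : List (Bool × (Int × Int)) → List (Bool × (Int × Int))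
  | (false, _) :: t => t
  | l => l

def pvTrimLast (l : List (Bool × (Int × Int))) : List (Bool × (Int × Int)) :=
  match l.getLast? with
  | some (false, _) => l.dropLast
  | _ => l

-- A's spans-of-grouped-counts is the direct run pass
theorem pvSpans_groupbyAux (l : List Bool) : ∀ (v : Bool) (c rs : Int),
    pvSpans rs (pvGroupbyAux v c l) = pvRuns v rs (rs + c) l := by
  induction l with
  | nil => intro v c rs; simp [pvGroupbyAux, pvSpans, pvRuns]
  | cons x xs ih =>
    intro v c rs
    by_cases h : x = v
    · subst h
      simp [pvGroupbyAux, pvRuns, ih]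
      rw [show rs + (c + 1) = rs + c + 1 by ring]
    · have hne : (x == v) = false := by cases x <;> cases v <;> simp_all
      simp [pvGroupbyAux, pvSpans, pvRuns, hne, ih]
      exact fun hxv => absurd hxv h

-- A's two trim steps in trimFirst/trimLast form
theorem pvA_trim (mask : List Bool) :
    merge_consecutive_bool mask = pvTrimLast (pvTrimFirst (pvSpans 0 (pvGroupby mask))) := by
  unfold merge_consecutive_bool
  match h : pvSpans 0 (pvGroupby mask) with
  | [] => rfl
  | (v, p) :: rest =>
    cases v
    · simp only [pvTrimFirst, pvTrimLast]
      match h2 : rest.getLast? with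
      | none => simp [List.getLast?_eq_none_iff.mp h2]
      | some (w, q) => cases w <;> simp
    · simp only [pvTrimFirst, pvTrimLast]
      match h2 : (((true, p) :: rest).getLast?) with
      | none => simp at h2
      | some (w, q) => cases w <;> simp

theorem pvRuns_ne_nil (l : List Bool) (v : Bool) (s i : Int) : pvRuns v s i l ≠ [] := by
  induction l generalizing v s i with
  | nil => simp [pvRuns]
  | cons x xs ih => simp only [pvRuns]; split <;> simp [ih]

-- the first span of pvRuns carries the current run value
theorem pvRuns_head (l : List Bool) : ∀ (v : Bool) (s i : Int) (w : Bool) (q : Int × Int)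
    (r : List (Bool × (Int × Int))), pvRuns v s i l = (w, q) :: r → w = v := by
  induction l with
  | nil =>
    intro v s i w q r h0
    simp only [pvRuns] at h0
    injection h0 with h1 _
    exact (congrArg Prod.fst h1).symm
  | cons y ys ih =>
    intro v s i w q r h0
    simp only [pvRuns] at h0
    split at h0
    · injection h0 with h1 _
      exact (congrArg Prod.fst h1).symm
    · exact ih _ _ _ _ _ _ h0

theorem pvTrimLast_cons (a : Bool × (Int × Int)) (l : List (Bool × (Int × Int))) (h : l ≠ []) :
    pvTrimLast (a :: l) = a :: pvTrimLast l := by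
  match l with
  | b :: t =>
    unfold pvTrimLast
    rw [List.getLast?_cons_cons]
    match h2 : (b :: t).getLast? with
    | none => simp at h2
    | some (w, q) => cases w <;> simp

theorem pvTP_some_head (xs : List Bool) : ∀ (s i : Int),
    ∃ e t, pvTP (some s) xs i = (s, e) :: t := by
  induction xs with
  | nil => intro s i; exact ⟨i, [], rfl⟩
  | cons x xs ih =>
    intro s i
    cases x
    · exact ⟨i, pvTP none xs (i + 1), rfl⟩
    · exact ih s (i + 1)

-- core correspondence: trimmed run list = build over the True-run pairs
theorem pvCore (xs : List Bool) :
    (∀ (s i : Int), pvTrimLast (pvRuns true s i xs) = pvBuild none (pvTP (some s) xs i)) ∧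
    (∀ (p i : Int), pvTrimLast (pvRuns false p i xs) = pvBuild (some p) (pvTP none xs i)) := by
  induction xs with
  | nil =>
    constructor
    · intro s i; simp [pvRuns, pvTP, pvBuild, pvTrimLast]
    · intro p i; simp [pvRuns, pvTP, pvBuild, pvTrimLast]
  | cons x xs ih =>
    constructor
    · intro s i
      cases x
      · -- the True run ends here; a False run begins at i
        have h1 : pvRuns true s i (false :: xs) = (true, (s, i)) :: pvRuns false i (i + 1) xs := by
          simp [pvRuns]
        rw [h1, pvTrimLast_cons _ _ (pvRuns_ne_nil _ _ _ _), ih.2]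
        simp [pvTP, pvBuild]
      · -- the True run continues
        have h1 : pvRuns true s i (true :: xs) = pvRuns true s (i + 1) xs := by simp [pvRuns]
        rw [h1, ih.1]
        rfl
    · intro p i
      cases x
      · -- the False run continues
        have h1 : pvRuns false p i (false :: xs) = pvRuns false p (i + 1) xs := by simp [pvRuns]
        rw [h1, ih.2]
        rfl
      · -- the False run ends; a True run begins at i
        have h1 : pvRuns false p i (true :: xs) = (false, (p, i)) :: pvRuns true i (i + 1) xs := by
          simp [pvRuns]
        rw [h1, pvTrimLast_cons _ _ (pvRuns_ne_nil _ _ _ _), ih.1]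
        obtain ⟨e, t, ht⟩ := pvTP_some_head xs i (i + 1)
        have h2 : pvTP none (true :: xs) i = pvTP (some i) xs (i + 1) := rfl
        rw [h2, ht]
        simp [pvBuild]

-- tail of a leading-False run list, trimmed, is the build over the True pairs
theorem pvCore3 (xs : List Bool) : ∀ (p i : Int),
    pvTrimLast (List.tail (pvRuns false p i xs)) = pvBuild none (pvTP none xs i) := by
  induction xs with
  | nil => intro p i; simp [pvRuns, pvTP, pvBuild, pvTrimLast]
  | cons x xs ih =>
    intro p i
    cases x
    · have h1 : pvRuns false p i (false :: xs) = pvRuns false p (i + 1) xs := by simp [pvRuns]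
      rw [h1, ih]
      rfl
    · have h1 : pvRuns false p i (true :: xs) = (false, (p, i)) :: pvRuns true i (i + 1) xs := by
        simp [pvRuns]
      rw [h1]
      simp only [List.tail_cons]
      rw [(pvCore xs).1]
      rfl

-- pvStarts is the pvF filter (previous value false) cast to Int
theorem pvStarts_eq_pvF (mask : List Bool) :
    pvStarts mask = (pvF false mask).map (fun i : Nat => (i : Int)) := by
  unfold pvStarts pvF
  congr 1
  apply List.filter_congr
  intro i _
  cases i <;> simp

-- pvEnds is the pvG filter, cast to Int plus one
theorem pvEnds_eq_pvG (mask : List Bool) :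
    pvEnds mask = (pvG mask).map (fun i : Nat => (i : Int) + 1) := rfl

theorem pvF_cons (p x : Bool) (xs : List Bool) :
    pvF p (x :: xs) = (if x && !p then [0] else []) ++ (pvF x xs).map Nat.succ := by
  unfold pvF
  rw [show (x :: xs).length = xs.length + 1 from rfl, List.range_succ_eq_map, List.filter_cons,
    List.filter_map]
  have key : List.filter
      ((fun i => (x :: xs).getD i false && (if i = 0 then !p else !((x :: xs).getD (i - 1) false)))
        ∘ Nat.succ) (List.range xs.length)
      = List.filter (fun i => xs.getD i false && (if i = 0 then !x else !(xs.getD (i - 1) false)))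
        (List.range xs.length) := by
    apply List.filter_congr
    intro i _
    cases i <;> simp [Function.comp]
  rw [key]
  cases x <;> cases p <;> simp

theorem pvG_cons (x : Bool) (xs : List Bool) :
    pvG (x :: xs) = (if x && !(xs.headD false) then [0] else []) ++ (pvG xs).map Nat.succ := by
  unfold pvG
  rw [show (x :: xs).length = xs.length + 1 from rfl, List.range_succ_eq_map, List.filter_cons,
    List.filter_map]
  have key : List.filter
      ((fun i => (x :: xs).getD i false &&
          (decide (i = xs.length + 1 - 1) || !((x :: xs).getD (i + 1) false)))
        ∘ Nat.succ) (List.range xs.length)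
      = List.filter (fun i => xs.getD i false &&
          (decide (i = xs.length - 1) || !(xs.getD (i + 1) false)))
        (List.range xs.length) := by
    apply List.filter_congr
    intro i hi
    have hlt : i < xs.length := List.mem_range.mp hi
    have hd : (decide (i + 1 = xs.length) : Bool) = decide (i = xs.length - 1) := by
      rw [decide_eq_decide]; omega
    simp [Function.comp, hd]
  rw [key]
  cases xs with
  | nil => cases x <;> simp
  | cons y ys => cases x <;> cases y <;> simp

-- the first components of pvTP are the start indices
theorem pvTP_fst (xs : List Bool) : ∀ (i : Int),
    ((pvTP none xs i).map Prod.fst = pvFr false xs i) ∧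
    (∀ s : Int, (pvTP (some s) xs i).map Prod.fst = s :: pvFr true xs i) := by
  induction xs with
  | nil => intro i; exact ⟨by simp [pvTP, pvFr], fun s => by simp [pvTP, pvFr]⟩
  | cons x xs ih =>
    intro i
    refine ⟨?_, fun s => ?_⟩
    · cases x
      · rw [show pvTP none (false :: xs) i = pvTP none xs (i + 1) from rfl, (ih (i + 1)).1]
        simp [pvFr]
      · rw [show pvTP none (true :: xs) i = pvTP (some i) xs (i + 1) from rfl, (ih (i + 1)).2 i]
        simp [pvFr]
    · cases x
      · rw [show pvTP (some s) (false :: xs) i = (s, i) :: pvTP none xs (i + 1) from rfl,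
          List.map_cons, (ih (i + 1)).1]
        simp [pvFr]
      · rw [show pvTP (some s) (true :: xs) i = pvTP (some s) xs (i + 1) from rfl, (ih (i + 1)).2 s]
        simp [pvFr]

-- the second components of pvTP are the end indices
theorem pvTP_snd (xs : List Bool) : ∀ (i : Int),
    ((pvTP none xs i).map Prod.snd = pvGr xs i) ∧
    (∀ s : Int, (pvTP (some s) xs i).map Prod.snd =
      (if !(xs.headD false) then [i] else []) ++ pvGr xs i) := by
  induction xs with
  | nil => intro i; exact ⟨by simp [pvTP, pvGr], fun s => by simp [pvTP, pvGr]⟩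
  | cons x xs ih =>
    intro i
    refine ⟨?_, fun s => ?_⟩
    · cases x
      · rw [show pvTP none (false :: xs) i = pvTP none xs (i + 1) from rfl, (ih (i + 1)).1]
        simp [pvGr]
      · rw [show pvTP none (true :: xs) i = pvTP (some i) xs (i + 1) from rfl, (ih (i + 1)).2 i]
        simp [pvGr]
    · cases x
      · rw [show pvTP (some s) (false :: xs) i = (s, i) :: pvTP none xs (i + 1) from rfl,
          List.map_cons, (ih (i + 1)).1]
        simp [pvGr]
      · rw [show pvTP (some s) (true :: xs) i = pvTP (some s) xs (i + 1) from rfl, (ih (i + 1)).2 s]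
        simp [pvGr]

-- cast bridge: the recursive Int start list is the Nat filter shifted by i
theorem pvFr_eq (xs : List Bool) : ∀ (p : Bool) (i : Int),
    pvFr p xs i = (pvF p xs).map (fun j : Nat => i + (j : Int)) := by
  induction xs with
  | nil => intro p i; simp [pvFr, pvF]
  | cons x xs ih =>
    intro p i
    rw [show pvFr p (x :: xs) i = (if x && !p then [i] else []) ++ pvFr x xs (i + 1) from rfl,
      ih x (i + 1), pvF_cons]
    cases hc : x && !p <;>
      simp [List.map_map, Function.comp, Nat.succ_eq_add_one, Nat.cast_add, Nat.cast_one,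
        add_comm, add_left_comm]

-- cast bridge: the recursive Int end list is the Nat filter shifted by i, plus one
theorem pvGr_eq (xs : List Bool) : ∀ (i : Int),
    pvGr xs i = (pvG xs).map (fun j : Nat => i + (j : Int) + 1) := by
  induction xs with
  | nil => intro i; simp [pvGr, pvG]
  | cons x xs ih =>
    intro i
    rw [show pvGr (x :: xs) i
        = (if x && !(xs.headD false) then [i + 1] else []) ++ pvGr xs (i + 1) from rfl,
      ih (i + 1), pvG_cons]
    cases hc : x && !(xs.headD false) <;>
      simp [List.map_map, Function.comp, Nat.succ_eq_add_one, Nat.cast_add, Nat.cast_one,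
        add_comm, add_left_comm, add_assoc]

-- zipping starts with ends recovers the True-run pair list
theorem pvZip_eq_pvTP (mask : List Bool) :
    (pvStarts mask).zip (pvEnds mask) = pvTP none mask 0 := by
  have hf : (pvTP none mask 0).map Prod.fst = pvStarts mask := by
    rw [(pvTP_fst mask 0).1, pvFr_eq, pvStarts_eq_pvF]
    simp
  have hs : (pvTP none mask 0).map Prod.snd = pvEnds mask := by
    rw [(pvTP_snd mask 0).1, pvGr_eq, pvEnds_eq_pvG]
    simp
  rw [← hf, ← hs, List.zip_map']
  simp

theorem merge_consecutive_bool_eq_alt (mask : List Bool) :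
    merge_consecutive_bool mask = merge_consecutive_bool_alt mask := by
  rw [pvA_trim]
  unfold merge_consecutive_bool_alt
  rw [pvZip_eq_pvTP]
  cases mask with
  | nil => rfl
  | cons x xs =>
    have hruns : pvSpans 0 (pvGroupby (x :: xs)) = pvRuns x 0 1 xs := by
      simpa using pvSpans_groupbyAux xs x 1 0
    rw [hruns]
    cases x
    · -- leading False run: A drops the head, then trims the last
      have htail : pvTrimFirst (pvRuns false 0 1 xs) = List.tail (pvRuns false 0 1 xs) := by
        match h : pvRuns false 0 1 xs with
        | [] => exact absurd h (pvRuns_ne_nil _ _ _ _)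
        | (v, q) :: t =>
          have hv : v = false := pvRuns_head xs false 0 1 v q t h
          subst hv
          simp [pvTrimFirst]
      have hstep : pvTP none (false :: xs) (0 : Int) = pvTP none xs 1 := by
        norm_num [pvTP]
      rw [htail, pvCore3 xs 0 1, hstep]
    · -- leading True run: the first trim keeps the list
      have hhead : pvTrimFirst (pvRuns true 0 1 xs) = pvRuns true 0 1 xs := by
        match h : pvRuns true 0 1 xs with
        | [] => exact absurd h (pvRuns_ne_nil _ _ _ _)
        | (v, q) :: t =>
          have hv : v = true := pvRuns_head xs true 0 1 v q t h
          subst hv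
          simp [pvTrimFirst]
      have hstep : pvTP none (true :: xs) (0 : Int) = pvTP (some 0) xs 1 := by
        norm_num [pvTP]
      rw [hhead, (pvCore xs).1, hstep]

-- ===== VERDICT (by name: the statement is the Claim_ definition above) =====
theorem merge_consecutive_bool_spec : Claim_equal_merge_consecutive_bool := by
  intro mask _
  unfold Spec_merge_consecutive_bool
  exact merge_consecutive_bool_eq_alt mask
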